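-- pv_equiv track=rewrite | github.com/syed192221118/python-programing | Write a program to find the number of composite numbers in an array of elements.py | count_composite
-- ===== SOURCE A (Python) =====
-- def count_composite(nums):
--     def is_composite(n):
--         if n < 2:
--             return False
--         for i in range(2, int(n ** 0.5) + 1):
--             if n % i == 0:
--                 return True
--         return False
--
--     return sum(1 for num in nums if is_composite(num))
-- ===== SOURCE B (Python) =====
-- def _is_composite(n):
--     if n < 2:
--         return False
--     d = 2
--     while d * d <= n:
--         if n % d == 0:
--             return True
--         d += 1
--     return False
--
--
-- def count_composite(nums):
--     counts = {}
--     for num in nums: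
--         counts[num] = counts.get(num, 0) + 1
--     total = 0
--     for v, c in counts.items():
--         if _is_composite(v):
--             total += c
--     return total
-- ===== Notes on version B (the rewrite author's own statement) =====
-- stated objective: alternative
-- what changed: B builds a counting dict of the distinct values in one pass and trial-divides each distinct value once with a d*d<=n loop (no float sqrt bound), then sums multiplicities of composite values, instead of A's per-element trial division over range(2, int(n**0.5)+1).
import Mathlib
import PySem

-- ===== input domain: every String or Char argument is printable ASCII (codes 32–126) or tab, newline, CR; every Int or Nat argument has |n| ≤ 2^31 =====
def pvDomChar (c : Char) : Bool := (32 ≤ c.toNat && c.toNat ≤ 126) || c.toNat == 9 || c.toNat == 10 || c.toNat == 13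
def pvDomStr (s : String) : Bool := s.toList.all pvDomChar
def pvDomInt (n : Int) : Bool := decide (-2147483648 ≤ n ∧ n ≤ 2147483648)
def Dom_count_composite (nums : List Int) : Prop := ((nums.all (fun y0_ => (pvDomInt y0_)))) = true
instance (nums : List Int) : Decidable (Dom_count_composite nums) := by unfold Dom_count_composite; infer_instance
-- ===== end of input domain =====

-- B replaces A's per-element trial division over range(2, int(sqrt)+1) by a counting dict
-- over the distinct values plus a d*d ≤ n divisor loop (each distinct value is tested once);
-- objective: alternative decomposition, same measured cost.

-- ===== PORT A =====
-- int(n ** 0.5) for 0 ≤ n ≤ 2^31: the double computation is exact there, ported as Nat.sqrt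
def pvIsqrt (n : Int) : Int := (Nat.sqrt n.toNat : Int)

def pvIsCompositeA (n : Int) : Bool :=
  if n < 2 then false
  else (PySem.List.pyRange 2 (pvIsqrt n + 1) 1).any (fun i => PySem.Int.mod n i == 0)

def count_composite (nums : List Int) : Int :=
  nums.foldl (fun acc num => if pvIsCompositeA num then acc + 1 else acc) 0

-- ===== PORT B =====
def pvCompLoopB (n : Nat) (d : Nat) : Bool :=
  if d * d ≤ n then
    if n % d == 0 then true else pvCompLoopB n (d + 1)
  else false
termination_by n + 2 - d
decreasing_by
  have hd : d ≤ n + 1 := by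
    cases d with
    | zero => omega
    | succ k =>
        have h1 : (k + 1) * 1 ≤ (k + 1) * (k + 1) := Nat.mul_le_mul_left _ (by omega)
        omega
  omega

def pvIsCompositeB (n : Int) : Bool :=
  if n < 2 then false else pvCompLoopB n.toNat 2

-- counts[num] = counts.get(num, 0) + 1 over nums
def pvCountsB (nums : List Int) : PySem.Dict Int Int :=
  nums.foldl (fun d num => d.insert num (d.getD num 0 + 1)) PySem.Dict.empty

def count_composite_alt (nums : List Int) : Int :=
  (pvCountsB nums).items.foldl
    (fun total vc => if pvIsCompositeB vc.1 then total + vc.2 else total) 0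

-- ===== PRECONDITION & SPEC =====
def Spec_count_composite (nums : List Int) (out : Int) : Prop := out = count_composite_alt nums
instance (nums : List Int) (out : Int) : Decidable (Spec_count_composite nums out) := by unfold Spec_count_composite; infer_instance

-- ===== CLAIM (what is proved, stated in full; the proofs are below) =====
def Claim_equal_count_composite : Prop := ∀ (nums : List Int), Dom_count_composite nums → Spec_count_composite nums (count_composite nums)

-- ===== LEMMAS AND PROOFS =====

-- B's divisor loop finds a divisor in [d, √n] iff one exists
theorem pvCompLoopB_true_iff (n : Nat) (d : Nat) :
    pvCompLoopB n d = true ↔ ∃ m : Nat, d ≤ m ∧ m * m ≤ n ∧ n % m = 0 := by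
  fun_induction pvCompLoopB n d with
  | case1 d hle hmod =>
      simp only [true_iff]
      exact ⟨d, le_refl d, hle, by simpa using hmod⟩
  | case2 d hle hmod ih =>
      rw [ih]
      constructor
      · rintro ⟨m, h1, h2, h3⟩; exact ⟨m, by omega, h2, h3⟩
      · rintro ⟨m, h1, h2, h3⟩
        refine ⟨m, ?_, h2, h3⟩
        rcases Nat.eq_or_lt_of_le h1 with h | h
        · exfalso; subst h; simp at hmod; omega
        · omega
  | case3 d hle =>
      simp only [Bool.false_eq_true, false_iff]
      rintro ⟨m, h1, h2, h3⟩
      have : d * d ≤ m * m := Nat.mul_le_mul h1 h1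
      omega

-- the two composite tests agree
theorem pvIsComposite_eq (n : Int) : pvIsCompositeA n = pvIsCompositeB n := by
  unfold pvIsCompositeA pvIsCompositeB
  split
  · rfl
  · rename_i hn
    have hn2 : (2 : Int) ≤ n := by omega
    have hN : n = ((n.toNat : Nat) : Int) := by omega
    rw [Bool.eq_iff_iff, List.any_eq_true, pvCompLoopB_true_iff]
    constructor
    · rintro ⟨i, hi, hdvd⟩
      rw [PySem.List.mem_pyRange_one] at hi
      obtain ⟨hi2, hilt⟩ := hi
      refine ⟨i.toNat, by omega, ?_, ?_⟩
      · have hle : i.toNat ≤ Nat.sqrt n.toNat := by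
          unfold pvIsqrt at hilt; omega
        exact Nat.le_sqrt.mp hle
      · have hieq : i = ((i.toNat : Nat) : Int) := by omega
        rw [hN, hieq, PySem.Int.mod_natCast] at hdvd
        exact_mod_cast beq_iff_eq.mp hdvd
    · rintro ⟨m, hm2, hmsq, hmod⟩
      refine ⟨(m : Int), ?_, ?_⟩
      · rw [PySem.List.mem_pyRange_one]
        have hle : m ≤ Nat.sqrt n.toNat := Nat.le_sqrt.mpr hmsq
        unfold pvIsqrt
        constructor <;> [exact_mod_cast hm2; omega]
      · rw [hN, PySem.Int.mod_natCast]
        exact beq_iff_eq.mpr (by exact_mod_cast hmod)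

-- indicator sum over a Nodup list containing x picks out x's entry
theorem pvSum_indicator {K : List Int} (hnd : K.Nodup) {x : Int} (hx : x ∈ K) (c : Int) :
    (K.map (fun k => if k = x then c else 0)).sum = c := by
  induction K with
  | nil => cases hx
  | cons k K ih =>
      simp only [List.map_cons, List.sum_cons]
      rcases List.mem_cons.mp hx with h | h
      · subst h
        have hnot : x ∉ K := (List.nodup_cons.mp hnd).1
        have hz : (K.map (fun j => if j = x then c else 0)).sum = 0 := by
          rw [List.sum_eq_zero]
          intro y hy
          obtain ⟨j, hj, rfl⟩ := List.mem_map.mp hy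
          simp only [ite_eq_right_iff]
          intro he; exact absurd (he ▸ hj) hnot
        simp [hz]
      · have hk : k ≠ x := by rintro rfl; exact (List.nodup_cons.mp hnd).1 h
        rw [if_neg hk, ih (List.nodup_cons.mp hnd).2 h]; ring

-- grouping: a weighted sum over the distinct values with multiplicities is the direct count
theorem pvGrouped_count (f : Int → Bool) (l : List Int) {K : List Int}
    (hnd : K.Nodup) (hsub : ∀ x ∈ l, x ∈ K) :
    (K.map (fun k => if f k then ((l.count k : Nat) : Int) else 0)).sum
      = ((l.countP f : Nat) : Int) := by
  induction l with
  | nil => simp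
  | cons x t ih =>
      have hsplit : (fun k => if f k then ((List.count k (x :: t) : Nat) : Int) else 0)
          = fun k => (if f k then ((t.count k : Nat) : Int) else 0)
              + (if k = x then (if f x then (1 : Int) else 0) else 0) := by
        funext k
        by_cases hfk : f k
        · by_cases hkx : k = x
          · subst hkx
            simp [hfk, Nat.cast_add]
          · have hc : List.count k (x :: t) = t.count k := by
              rw [List.count_cons]
              simp [show ¬ (x == k) = true by simpa using fun h => hkx h.symm]
            simp [hfk, hkx, hc]
        · by_cases hkx : k = x
          · subst hkx; simp [hfk]
          · simp [hfk, hkx]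
      rw [hsplit]
      rw [PySem.List.sum_map_add_int]
      rw [ih (fun y hy => hsub y (List.mem_cons_of_mem x hy))]
      rw [pvSum_indicator hnd (hsub x (List.mem_cons_self))]
      rw [List.countP_cons]
      by_cases hfx : f x <;> simp [hfx]

-- ===== VERDICT (by name: the statement is the Claim_ definition above) =====
theorem count_composite_spec : Claim_equal_count_composite := by
  intro nums _
  unfold Spec_count_composite count_composite count_composite_alt pvCountsB
  rw [PySem.Dict.foldl_insert_getD_add_one_eq_counter, PySem.Dict.items_counter]
  have hstep : (fun (total : Int) (vc : Int × Int) =>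
      if pvIsCompositeB vc.1 then total + vc.2 else total)
      = fun total vc => total + (if pvIsCompositeB vc.1 then vc.2 else 0) := by
    funext t p; split <;> simp
  rw [hstep, PySem.List.foldl_add, List.map_map]
  have hcomp : ((fun (vc : Int × Int) => if pvIsCompositeB vc.1 then vc.2 else 0)
        ∘ fun k => (k, ((nums.count k : Nat) : Int)))
      = fun k => (if pvIsCompositeA k then ((nums.count k : Nat) : Int) else 0) := by
    funext k; simp [pvIsComposite_eq]
  rw [hcomp]
  rw [pvGrouped_count pvIsCompositeA nums (PySem.Set.nodup_ofList nums)
      (fun x hx => (PySem.Set.mem_ofList nums x).mpr hx)]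
  rw [PySem.List.foldl_count_if]
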